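/- GENERATED by farm/mkstatement.py from design/units.tsv (unit `start_decoder.C6a`) and the assertions of Vorbis/Spec/StartDecoderC6.lean — do not edit.
   THE STATEMENT of the proof unit `start_decoder.C6a`: segment C6a of `start_decoder` (26 instructions; entries 0x114668;
   exits 0x113b22,0x1148b0,0x1148f3; ranges 0x114668-0x114699 + 0x11487b-0x11488d + 0x114892-0x1148ab + 0x1148e7-0x1148ee)
   takes each of its entry assertions to one of its exit assertions (`Vorbis.Spec.StartDecoder.SegC6a`), given the contracts of its callees.
   What the names mean: Vorbis/Spec/Basic.lean (the shared hypotheses), Vorbis/Spec/StartDecoderC6.lean (the assertions). The theorem to prove: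
   `theorem start_decoder_C6a_ok : Vorbis.Spec.start_decoder_C6a.Statement`. -/
import Vorbis.Spec.Alloc
import Vorbis.Spec.Leaves
import Vorbis.Spec.StartDecoderC6
namespace Vorbis.Spec.start_decoder_C6a
open X86 X86.User Asan

/-- The statement of unit `start_decoder.C6a`. -/
def Statement : Prop :=
  ∀ (Lay : Layout) (_hLay : Lay.hi = 0x1000000) (μ : Microarch) (_hμ : UserX.MicroOK μ) (u₀ : State)
    (_hcode : HasCodeNat Lay u₀ Vorbis.L.start_decoder.entry Vorbis.Code.code_start_decoder.nat Vorbis.L.start_decoder.size)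
    (_h_asan_store4_noabort : Asan.SmallCheck Lay μ Vorbis.WayInv (Vorbis.CodeOK u₀) [.rax, .rcx, .rdx] 4 Vorbis.L.__asan_store4_noabort.entry)
    (_h_asan_load4_noabort : Asan.SmallCheck Lay μ Vorbis.WayInv (Vorbis.CodeOK u₀) [.rax, .rcx, .rdx] 4 Vorbis.L.__asan_load4_noabort.entry)
    (_h_error : ∀ (others : List Obj) (frames : List (Nat × FrameLayout)), Calls Lay μ Vorbis.WayInv (Vorbis.conv u₀) Vorbis.L.error.entry (Vorbis.Spec.error.spec others frames))
    (_h_setup_malloc : ∀ (others : List Obj) (frames : List (Nat × FrameLayout)) (A : Arena), Calls Lay μ Vorbis.WayInv (Vorbis.conv u₀) Vorbis.L.setup_malloc.entry (Vorbis.Spec.setup_malloc.spec others frames A)),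
    Vorbis.Spec.StartDecoder.SegC6a Lay μ u₀

end Vorbis.Spec.start_decoder_C6a
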